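-- pv_equiv track=rewrite | github.com/lianaduenha/MPSoCTester | modules/controller.py | platformName
-- ===== SOURCE A (Python) =====
-- def platformName(string):
-- 	u = string.split(' ')
--
-- 	p = ''
-- 	i = ''
-- 	pw = ''
-- 	n = ''
-- 	s = ''
--
--
-- 	for t in u:
-- 		y = t.split('=')
-- 		c = y[0].strip('-')
--
-- 		if c == 'p':
-- 			p = y[-1]
--
-- 		elif c == 'i':
-- 			i = y[-1]
--
-- 		elif c == 'pw':
-- 			pw = 'pw'
--
-- 		elif c == 'n':
-- 			n = y[-1]
--
-- 		elif c == 's':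
-- 			s = y[-1]
--
--
--
-- 	if pw == '':
-- 		namePlatform = p + '.' + i + '.' + n + '.' + s
--
-- 	else:
-- 		namePlatform = p + '.' + i + '.' + pw + '.' + n + '.' + s
--
--
-- 	return namePlatform
-- ===== SOURCE B (Python) =====
-- def platformName(string):
--     toks = [t.split('=') for t in string.split(' ')]
--
--     def field(key):
--         for y in reversed(toks):
--             if y[0].strip('-') == key:
--                 return y[-1]
--         return ''
--
--     parts = [field('p'), field('i')]
--     if any(y[0].strip('-') == 'pw' for y in toks):
--         parts.append('pw')
--     parts += [field('n'), field('s')]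
--     return '.'.join(parts)
-- ===== Notes on version B (the rewrite author's own statement) =====
-- stated objective: simpler
-- what changed: Replaces the five-way if/elif dispatch inside one stateful loop by per-field reverse searches (last-wins lookup) over the pre-split tokens plus a join-based assembly.
import Mathlib
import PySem

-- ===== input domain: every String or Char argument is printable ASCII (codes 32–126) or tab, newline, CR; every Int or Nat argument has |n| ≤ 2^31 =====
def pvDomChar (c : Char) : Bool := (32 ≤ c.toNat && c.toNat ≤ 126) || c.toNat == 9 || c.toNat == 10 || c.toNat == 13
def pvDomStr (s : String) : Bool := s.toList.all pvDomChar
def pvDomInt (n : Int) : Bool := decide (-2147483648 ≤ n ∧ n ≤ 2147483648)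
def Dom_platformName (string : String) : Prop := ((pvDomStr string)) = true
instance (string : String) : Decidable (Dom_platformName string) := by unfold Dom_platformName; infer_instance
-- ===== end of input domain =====

-- B replaces A's single stateful if/elif loop by per-field last-match reverse searches; objective: simpler.

-- str.split(sep) with a nonempty literal separator (split? is none only for sep = "")
def pvSplit (s sep : String) : List String := (PySem.Str.split? s sep).getD []

-- ===== PORT A =====
-- the loop body of A, acting on the state (p, i, pw, n, s)
def pvStepA (st : String × String × String × String × String) (t : String) :
    String × String × String × String × String :=
  let y := pvSplit t "="
  let c := PySem.Str.stripChars (y.headD "") "-"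
  if c = "p" then (y.getLastD "", st.2.1, st.2.2.1, st.2.2.2.1, st.2.2.2.2)
  else if c = "i" then (st.1, y.getLastD "", st.2.2.1, st.2.2.2.1, st.2.2.2.2)
  else if c = "pw" then (st.1, st.2.1, "pw", st.2.2.2.1, st.2.2.2.2)
  else if c = "n" then (st.1, st.2.1, st.2.2.1, y.getLastD "", st.2.2.2.2)
  else if c = "s" then (st.1, st.2.1, st.2.2.1, st.2.2.2.1, y.getLastD "")
  else st

def platformName (string : String) : String :=
  let u := pvSplit string " "
  let st := u.foldl pvStepA ("", "", "", "", "")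
  if st.2.2.1 = "" then
    st.1 ++ "." ++ st.2.1 ++ "." ++ st.2.2.2.1 ++ "." ++ st.2.2.2.2
  else
    st.1 ++ "." ++ st.2.1 ++ "." ++ st.2.2.1 ++ "." ++ st.2.2.2.1 ++ "." ++ st.2.2.2.2

-- ===== PORT B =====
-- B's key of a token
def pvKey (y : List String) : String := PySem.Str.stripChars (y.headD "") "-"

-- B's `field`: first token in reversed order whose stripped key equals `key`
def pvField (toks : List (List String)) (key : String) : String :=
  match toks.reverse.find? (fun y => pvKey y == key) with
  | some y => y.getLastD ""
  | none => ""

def platformName_alt (string : String) : String :=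
  let toks := (pvSplit string " ").map (fun t => pvSplit t "=")
  let parts := [pvField toks "p", pvField toks "i"]
  let parts := if toks.any (fun y => pvKey y == "pw") then parts ++ ["pw"] else parts
  let parts := parts ++ [pvField toks "n", pvField toks "s"]
  PySem.Str.join "." parts

-- ===== PRECONDITION & SPEC =====
def Spec_platformName (string : String) (out : String) : Prop := out = platformName_alt string
instance (string : String) (out : String) : Decidable (Spec_platformName string out) := by unfold Spec_platformName; infer_instance

-- ===== CLAIM (what is proved, stated in full; the proofs are below) =====
def Claim_equal_platformName : Prop := ∀ (string : String), Dom_platformName string → Spec_platformName string (platformName string)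

-- ===== LEMMAS AND PROOFS =====

def pvFieldD (toks : List (List String)) (key d : String) : String :=
  match toks.reverse.find? (fun y => pvKey y == key) with
  | some y => y.getLastD ""
  | none => d

theorem pvFieldD_nil (key d : String) : pvFieldD [] key d = d := rfl

theorem pvFieldD_cons (y : List String) (toks : List (List String)) (key d : String) :
    pvFieldD (y :: toks) key d =
      pvFieldD toks key (if pvKey y = key then y.getLastD "" else d) := by
  simp only [pvFieldD, List.reverse_cons, List.find?_append]
  cases h : toks.reverse.find? (fun y => pvKey y == key) with
  | some z => simp
  | none =>
    simp only [Option.none_or]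
    by_cases hk : pvKey y = key
    · simp [List.find?, hk]
    · have hb : (pvKey y == key) = false := beq_eq_false_iff_ne.mpr hk
      simp [List.find?, hb, hk]

-- A's step, component-wise (the elif keys are pairwise distinct strings)
set_option maxHeartbeats 1000000 in
theorem pvStepA_eq (st : String × String × String × String × String) (t : String) :
    pvStepA st t =
      ((if pvKey (pvSplit t "=") = "p" then (pvSplit t "=").getLastD "" else st.1),
       (if pvKey (pvSplit t "=") = "i" then (pvSplit t "=").getLastD "" else st.2.1),
       (if pvKey (pvSplit t "=") = "pw" then "pw" else st.2.2.1),
       (if pvKey (pvSplit t "=") = "n" then (pvSplit t "=").getLastD "" else st.2.2.2.1),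
       (if pvKey (pvSplit t "=") = "s" then (pvSplit t "=").getLastD "" else st.2.2.2.2)) := by
  unfold pvStepA pvKey
  split_ifs with h1 h2 h3 h4 h5 <;> simp_all

-- invariant of A's fold: each state component is the last-match lookup, with the
-- incoming component as default
set_option maxHeartbeats 2000000 in
theorem pvFold_invariant (u : List String) :
    ∀ st : String × String × String × String × String,
      (u.foldl pvStepA st) =
        (pvFieldD (u.map (fun t => pvSplit t "=")) "p" st.1,
         pvFieldD (u.map (fun t => pvSplit t "=")) "i" st.2.1,
         (if (u.map (fun t => pvSplit t "=")).any (fun y => pvKey y == "pw")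
            then "pw" else st.2.2.1),
         pvFieldD (u.map (fun t => pvSplit t "=")) "n" st.2.2.2.1,
         pvFieldD (u.map (fun t => pvSplit t "=")) "s" st.2.2.2.2) := by
  induction u with
  | nil => intro st; simp [pvFieldD_nil]
  | cons t rest ih =>
    intro st
    rw [List.foldl_cons, ih, pvStepA_eq]
    simp only [List.map_cons, List.any_cons, pvFieldD_cons, Prod.mk.injEq]
    by_cases h : pvKey (pvSplit t "=") = "pw" <;>
      by_cases h2 : (List.map (fun t => pvSplit t "=") rest).any (fun y => pvKey y == "pw") <;>
        simp [h, h2]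

theorem pvField_eq (toks : List (List String)) (key : String) :
    pvField toks key = pvFieldD toks key "" := rfl

theorem pvDotCons (l : List Char) : String.ofList ('.' :: l) = "." ++ String.ofList l := by
  have h : ('.' :: l) = ("." : String).toList ++ l := by simp
  rw [h, String.ofList_append]; simp

-- join "." on explicit small lists, as string appends
theorem pvJoin4 (a b c d : String) :
    PySem.Str.join "." [a, b, c, d] = a ++ "." ++ b ++ "." ++ c ++ "." ++ d := by
  simp [PySem.Str.join, PySem.Chars.join, List.intercalate, pvDotCons,
    String.ofList_append, String.append_assoc]

theorem pvJoin5 (a b c d e : String) :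
    PySem.Str.join "." [a, b, c, d, e] = a ++ "." ++ b ++ "." ++ c ++ "." ++ d ++ "." ++ e := by
  simp [PySem.Str.join, PySem.Chars.join, List.intercalate, pvDotCons,
    String.ofList_append, String.append_assoc]

-- ===== VERDICT (by name: the statement is the Claim_ definition above) =====
set_option maxHeartbeats 2000000 in
theorem platformName_spec : Claim_equal_platformName := by
  intro string _
  unfold Spec_platformName platformName platformName_alt
  simp only [pvFold_invariant, pvField_eq]
  by_cases h : ((pvSplit string " ").map (fun t => pvSplit t "=")).any (fun y => pvKey y == "pw")
  · simp [h, pvJoin5, String.append_assoc]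
  · simp [h, pvJoin4, String.append_assoc]
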